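-- pv_equiv track=rewrite | github.com/Qenszu/workshop | python/ASD/past_kol_off_egz/23_24/egz/kunlucky/egz3b.py | kunlucky
-- ===== SOURCE A (Python) =====
-- def kunlucky(T, k):
--     n = len(T)
--     K = [False for _ in range(n+1)]
--     ind = 1
--
--     while k <= n:
--         K[k] = True
--         k = k + (k % ind) + 7
--         ind += 1
--
--     maxi = 1
--     f = [[0 for _ in range(3)] for _ in range(n)]
--     if K[T[0]]:
--         f[0][0] = 0
--     else:
--         f[0][0] = 1
--     f[0][1] = 1
--     f[0][2] = 1
--
--     for i in range(1, n):
--         if K[T[i]]: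
--             f[i][0] = 0
--             f[i][1] = f[i-1][0] + 1
--             f[i][2] = f[i-1][1] + 1
--         else:
--             f[i][0] = f[i-1][0] + 1
--             f[i][1] = f[i-1][1] + 1
--             f[i][2] = f[i-1][2] + 1
--         maxi = max(maxi, f[i][2])
--
--
--
--     return maxi
-- ===== SOURCE B (Python) =====
-- def kunlucky(T, k):
--     n = len(T)
--     # same lucky-index marking loop as the original
--     K = [False] * (n + 1)
--     ind = 1
--     while k <= n:
--         K[k] = True
--         k = k + (k % ind) + 7
--         ind += 1
--     # Two-pointer sliding window instead of the 3-column DP: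
--     # grow the window with `right`, shrink from `left` while it holds
--     # more than 2 lucky elements; the answer is the largest window seen.
--     left = 0
--     cnt = 0
--     ans = 0
--     for right in range(n):
--         if K[T[right]]:
--             cnt += 1
--         while cnt > 2:
--             if K[T[left]]:
--                 cnt -= 1
--             left += 1
--         ans = max(ans, right - left + 1)
--     return ans
-- ===== Notes on version B (the rewrite author's own statement) =====
-- stated objective: alternative
-- what changed: A's per-index 3-column DP table (longest suffix ending at i with <=0/1/2 lucky elements) is replaced by a two-pointer sliding window that maintains window endpoints and a count of lucky elements, shrinking from the left while the count exceeds 2.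
import Mathlib
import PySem

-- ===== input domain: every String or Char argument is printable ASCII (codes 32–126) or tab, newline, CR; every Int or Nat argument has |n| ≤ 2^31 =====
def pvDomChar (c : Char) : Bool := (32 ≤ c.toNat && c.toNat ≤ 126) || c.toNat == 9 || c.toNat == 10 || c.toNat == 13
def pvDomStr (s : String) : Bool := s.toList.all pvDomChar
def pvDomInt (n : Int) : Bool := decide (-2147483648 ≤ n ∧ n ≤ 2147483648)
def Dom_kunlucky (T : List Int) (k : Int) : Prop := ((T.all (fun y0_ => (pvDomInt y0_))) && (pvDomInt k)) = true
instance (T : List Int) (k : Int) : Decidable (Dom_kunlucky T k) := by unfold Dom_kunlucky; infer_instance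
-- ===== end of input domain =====

-- B replaces A's 3-column DP table by a two-pointer sliding window with a lucky-element
-- counter (objective: alternative, same O(n) cost; the K-marking while loop is the same
-- in both Pythons, each port transliterates its own copy).

-- ===== PORT A =====
-- A's 'while k <= n' loop marking lucky indices in K. Python's 'ind' starts at 1 and only
-- grows; it is carried as 'j' with ind = j+1. 'fuel' only totalizes the loop (it never runs
-- out: k grows by at least 7 each iteration, so (n+1-k).toNat+1 steps always suffice).
-- K[k] with possibly negative k is Python negative-index assignment: PySem.List.pySetD
-- (out-of-range k < -(len K) raises in Python; excluded by Pre_).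
def buildLuckyGo : Nat → List Bool → Int → Nat → Int → List Bool
  | 0, K, _, _, _ => K
  | fuel + 1, K, k, j, n =>
    if k ≤ n then
      buildLuckyGo fuel (PySem.List.pySetD K k true) (k + PySem.Int.mod k ((j : Int) + 1) + 7) (j + 1) n
    else K

def buildLucky (K : List Bool) (k : Int) (n : Int) : List Bool :=
  buildLuckyGo ((n + 1 - k).toNat + 1) K k 0 n

-- one step of A's DP loop: st = (f[i-1][0], f[i-1][1], f[i-1][2], maxi).
-- (A materialises the whole table f, but row i only reads row i-1, so the port
-- carries exactly that row plus maxi.)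
def kunluckyStepA (L : Int → Bool) (st : Int × Int × Int × Int) (i : Int) : Int × Int × Int × Int :=
  match st with
  | (f0, f1, f2, maxi) =>
    let row := if L i then ((0 : Int), f0 + 1, f1 + 1) else (f0 + 1, f1 + 1, f2 + 1)
    (row.1, row.2.1, row.2.2, max maxi row.2.2)

def kunlucky (T : List Int) (k : Int) : Int :=
  let n : Int := (T.length : Int)
  let K := buildLucky (List.replicate (T.length + 1) false) k n
  -- K[T[i]] (negative values index from the end, as in Python; out of range raises → Pre_)
  let L : Int → Bool := fun i => PySem.List.pyGetD K (PySem.List.pyGetD T i 0) false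
  let init : Int × Int × Int × Int := (if L 0 then 0 else 1, 1, 1, 1)
  let s := (PySem.List.pyRange 1 n 1).foldl (kunluckyStepA L) init
  s.2.2.2

-- ===== PORT B =====
-- B's copy of the marking while loop (same Python text); here 'ind' is carried directly
-- as an Int. 'fuel' only totalizes it, exactly as in port A.
def markLucky : Nat → List Bool → Int → Int → Int → List Bool
  | 0, K, _, _, _ => K
  | fuel + 1, K, k, ind, n =>
    if k ≤ n then
      markLucky fuel (PySem.List.pySetD K k true) (k + PySem.Int.mod k ind + 7) (ind + 1) n
    else K

-- the inner 'while cnt > 2' loop: advance left, decrementing cnt on lucky positions.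
-- fuel totalizes it (n+1 steps always suffice: left never passes right < n).
def shrinkB (L : Int → Bool) : Nat → Int → Int → Int × Int
  | 0, left, cnt => (left, cnt)
  | fuel + 1, left, cnt =>
    if 2 < cnt then shrinkB L fuel (left + 1) (if L left then cnt - 1 else cnt)
    else (left, cnt)

-- one iteration of B's for loop: st = (left, cnt, ans)
def kunluckyStepB (L : Int → Bool) (fuel : Nat) (st : Int × Int × Int) (right : Int) : Int × Int × Int :=
  match st with
  | (left, cnt, ans) =>
    let c1 := if L right then cnt + 1 else cnt
    let lc := shrinkB L fuel left c1
    (lc.1, lc.2, max ans (right - lc.1 + 1))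

def kunlucky_alt (T : List Int) (k : Int) : Int :=
  let n : Int := (T.length : Int)
  let K := markLucky ((n + 1 - k).toNat + 1) (List.replicate (T.length + 1) false) k 1 n
  let L : Int → Bool := fun i => PySem.List.pyGetD K (PySem.List.pyGetD T i 0) false
  let s := (PySem.List.pyRange 0 n 1).foldl (kunluckyStepB L (T.length + 1)) (0, 0, 0)
  s.2.2

-- ===== PRECONDITION & SPEC =====
-- A raises IndexError on empty T (via T[0]), when the marking loop hits K[k] with
-- k < -(n+1), and when some T[i] indexes K outside [-(n+1), n]; exactly those are excluded.
def Pre_kunlucky (T : List Int) (k : Int) : Prop :=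
  T ≠ [] ∧ -((T.length : Int) + 1) ≤ k ∧
    ∀ x ∈ T, -((T.length : Int) + 1) ≤ x ∧ x ≤ (T.length : Int)
instance (T : List Int) (k : Int) : Decidable (Pre_kunlucky T k) := by
  unfold Pre_kunlucky; infer_instance

def pvWitness_kunlucky : List Int × Int := ([3, 1, 4, 1, 5, -2, 0], 2)

def Spec_kunlucky (T : List Int) (k : Int) (out : Int) : Prop := out = kunlucky_alt T k
instance (T : List Int) (k : Int) (out : Int) : Decidable (Spec_kunlucky T k out) := by
  unfold Spec_kunlucky; infer_instance

-- ===== CLAIM (what is proved, stated in full; the proofs are below) =====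
def Claim_equal_kunlucky : Prop :=
  ∀ (T : List Int) (k : Int), Dom_kunlucky T k → Pre_kunlucky T k → Spec_kunlucky T k (kunlucky T k)

-- ===== LEMMAS AND PROOFS =====

-- the two transliterations of the (identical) Python marking loop agree
theorem markLucky_eq_buildLuckyGo (fuel : Nat) : ∀ (K : List Bool) (k : Int) (j : Nat) (n : Int),
    markLucky fuel K k ((j : Int) + 1) n = buildLuckyGo fuel K k j n := by
  induction fuel with
  | zero => intro K k j n; rfl
  | succ f ih =>
    intro K k j n
    simp only [markLucky, buildLuckyGo]
    split
    · have : ((j : Int) + 1) + 1 = (((j + 1 : Nat) : Int) + 1) := by push_cast; ring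
      rw [this, ih]
    · rfl

-- a shrink on a count ≤ 2 does nothing
theorem shrinkB_le (L : Int → Bool) (fuel : Nat) (left cnt : Int) (h : cnt ≤ 2) :
    shrinkB L fuel left cnt = (left, cnt) := by
  cases fuel with
  | zero => rfl
  | succ f => simp only [shrinkB]; rw [if_neg (by omega)]

-- a shrink starting at count 3 stops one past the first lucky position
theorem shrinkB_hit (L : Int → Bool) : ∀ (fuel : Nat) (left q : Int), left ≤ q →
    L q = true → (∀ j, left ≤ j → j < q → L j = false) → q - left < (fuel : Int) →
    shrinkB L fuel left 3 = (q + 1, 2) := by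
  intro fuel
  induction fuel with
  | zero => intro left q h1 _ _ hf; exfalso; omega
  | succ f ih =>
    intro left q h1 hq hno hf
    simp only [shrinkB]
    rw [if_pos (by omega)]
    rcases eq_or_lt_of_le h1 with he | hlt
    · subst he
      rw [hq, if_pos rfl]
      norm_num
      exact shrinkB_le L f (left + 1) 2 le_rfl
    · rw [hno left le_rfl hlt]
      simp only [Bool.false_eq_true, reduceIte]
      exact ih (left + 1) q (by omega) hq
        (fun j hj1 hj2 => hno j (by omega) hj2) (by push_cast at hf ⊢; omega)

-- The main invariant: after m ≥ 1 processed indices, A's DP row is the distances to the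
-- three most recent lucky positions (a ≥ b ≥ c, -1 when absent), B's window starts at c+1
-- with cnt luckies inside, and the running maxima agree.
theorem kunlucky_inv (L : Int → Bool) (fuel : Nat) (m : Nat) (hm : 1 ≤ m) :
    (m : Int) ≤ (fuel : Int) →
    ∃ a b c M cnt,
      (PySem.List.pyRange 1 (m : Int) 1).foldl (kunluckyStepA L)
          (if L 0 then 0 else 1, 1, 1, 1) = ((m : Int) - 1 - a, (m : Int) - 1 - b, (m : Int) - 1 - c, M) ∧
      (PySem.List.pyRange 0 (m : Int) 1).foldl (kunluckyStepB L fuel) (0, 0, 0)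
          = (c + 1, cnt, M) ∧
      cnt = (if 0 ≤ b then 2 else if 0 ≤ a then 1 else 0) ∧
      (-1 ≤ c ∧ c ≤ b ∧ b ≤ a ∧ a < (m : Int)) ∧
      (0 ≤ b → c < b) ∧ (0 ≤ a → b < a) ∧
      (0 ≤ a → L a = true) ∧ (0 ≤ b → L b = true) ∧
      (∀ j : Int, c < j → j < (m : Int) → L j = true → j = a ∨ j = b) := by
  induction m, hm using Nat.le_induction with
  | base =>
    intro hf
    have h1 : PySem.List.pyRange 1 (1 : Int) 1 = [] := PySem.List.pyRange_one_eq_nil le_rfl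
    have h0 : PySem.List.pyRange 0 (1 : Int) 1 = [0] := by
      simpa using PySem.List.pyRange_one_singleton (a := 0)
    rw [Nat.cast_one, h1, h0]
    simp only [List.foldl_nil, List.foldl_cons, kunluckyStepB]
    cases hL : L 0
    · refine ⟨-1, -1, -1, 1, 0, ?_, ?_, by norm_num, by norm_num, by omega, by omega,
        by omega, by omega, ?_⟩
      · simp
      · simp only [Bool.false_eq_true, reduceIte]
        rw [shrinkB_le L fuel 0 0 (by omega)]
        norm_num
      · intro j hj1 hj2 hj3
        have : j = 0 := by omega
        rw [this, hL] at hj3; exact absurd hj3 (by simp)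
    · refine ⟨0, -1, -1, 1, 1, ?_, ?_, by norm_num, by norm_num, by omega, by omega,
        fun _ => hL, by omega, ?_⟩
      · simp
      · simp only [reduceIte]
        rw [shrinkB_le L fuel 0 (0 + 1) (by omega)]
        norm_num
      · intro j hj1 hj2 _
        left; omega
  | succ m hm ih =>
    intro hf
    obtain ⟨a, b, c, M, cnt, hA, hB, hcnt, hord, hcb, hba, hLa, hLb, hlucky⟩ :=
      ih (by push_cast at hf ⊢; omega)
    have hc : ((m + 1 : Nat) : Int) = (m : Int) + 1 := by push_cast; ring
    have hAr : PySem.List.pyRange 1 ((m + 1 : Nat) : Int) 1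
        = PySem.List.pyRange 1 (m : Int) 1 ++ [(m : Int)] := by
      rw [hc]; exact PySem.List.pyRange_one_succ_right (by exact_mod_cast hm)
    have hBr : PySem.List.pyRange 0 ((m + 1 : Nat) : Int) 1
        = PySem.List.pyRange 0 (m : Int) 1 ++ [(m : Int)] := by
      rw [hc]; exact PySem.List.pyRange_one_succ_right (by positivity)
    rw [hAr, hBr, List.foldl_append, List.foldl_append, hA, hB,
      List.foldl_cons, List.foldl_cons, List.foldl_nil, List.foldl_nil]
    simp only [kunluckyStepA, kunluckyStepB]
    cases hL : L (m : Int)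
    · -- T[m] not lucky: everything shifts by one, window keeps its left end
      have hcle : cnt ≤ 2 := by rw [hcnt]; split <;> [omega; (split <;> omega)]
      refine ⟨a, b, c, max M ((m : Int) - c), cnt, ?_, ?_, hcnt, by omega, hcb, hba,
        hLa, hLb, ?_⟩
      · simp only [Bool.false_eq_true, reduceIte]
        rw [hc]
        simp only [Prod.mk.injEq]
        refine ⟨by omega, by omega, by omega, ?_⟩
        congr 1; omega
      · simp only [Bool.false_eq_true, reduceIte]
        rw [shrinkB_le L fuel (c + 1) cnt hcle]
        simp only [Prod.mk.injEq]
        refine ⟨trivial, trivial, ?_⟩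
        congr 1; omega
      · intro j hj1 hj2 hj3
        rw [hc] at hj2
        rcases lt_or_ge j (m : Int) with h | h
        · exact hlucky j hj1 h hj3
        · have : j = (m : Int) := by omega
          rw [this, hL] at hj3; exact absurd hj3 (by simp)
    · -- T[m] lucky
      by_cases hb : 0 ≤ b
      · -- third lucky in the window: shrink to just past b
        have hcnt2 : cnt = 2 := by rw [hcnt, if_pos hb]
        have hnol : ∀ j, c + 1 ≤ j → j < b → L j = false := by
          intro j hj1 hj2
          cases hLj : L j
          · rfl
          · exfalso
            have hba' := hba (by omega)
            obtain ⟨ho1, ho2, ho3, ho4⟩ := hord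
            rcases hlucky j (by omega) (by omega) hLj with h | h <;> omega
        refine ⟨(m : Int), a, b, max M ((m : Int) - b), 2, ?_, ?_, ?_, ?_, ?_, ?_,
          fun _ => hL, hLa, ?_⟩
        · simp only [reduceIte]
          rw [hc]
          simp only [Prod.mk.injEq]
          refine ⟨by omega, by omega, by omega, ?_⟩
          congr 1; omega
        · simp only [reduceIte]
          have h3 : cnt + 1 = 3 := by omega
          rw [h3, shrinkB_hit L fuel (c + 1) b (by have := hcb hb; omega) (hLb hb) hnol
            (by have := hcb hb; have := hba (by omega); push_cast at hf ⊢; omega)]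
          simp only [Prod.mk.injEq]
          refine ⟨trivial, trivial, ?_⟩
          congr 1; omega
        · rw [if_pos (le_trans hb hord.2.2.1)]
        · rw [hc]; have := hba (by omega); omega
        · intro _; exact hba (by omega)
        · intro _; exact hord.2.2.2
        · intro j hj1 hj2 hj3
          rw [hc] at hj2
          rcases lt_or_ge j (m : Int) with h | h
          · rcases hlucky j (by omega) h hj3 with h' | h'
            · right; exact h'
            · omega
          · left; omega
      · -- at most one lucky so far: b = c = -1, window still starts at 0
        have hbe : b = -1 := by omega
        have hce : c = -1 := by omega
        have hcle : cnt + 1 ≤ 2 := by rw [hcnt, if_neg hb]; split <;> omega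
        refine ⟨(m : Int), a, -1, max M ((m : Int) + 1),
          if 0 ≤ a then 2 else if 0 ≤ (m : Int) then 1 else 0, ?_, ?_, rfl, ?_, ?_, ?_,
          fun _ => hL, hLa, ?_⟩
        · simp only [reduceIte]
          rw [hc]
          simp only [Prod.mk.injEq]
          refine ⟨by omega, by omega, by omega, ?_⟩
          congr 1; omega
        · simp only [reduceIte]
          rw [shrinkB_le L fuel (c + 1) (cnt + 1) hcle]
          rw [hce]
          simp only [Prod.mk.injEq]
          refine ⟨trivial, ?_, ?_⟩
          · rw [hcnt, hbe]
            have hmz : (0 : Int) ≤ (m : Int) := by positivity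
            rw [if_neg (by omega), if_pos hmz]
            split <;> norm_num
          · trivial
        · rw [hc]; omega
        · omega
        · intro _; omega
        · intro j hj1 hj2 hj3
          rw [hc] at hj2
          rcases lt_or_ge j (m : Int) with h | h
          · rcases hlucky j (by omega) h hj3 with h' | h' <;> omega
          · left; omega

theorem kunlucky_spec : Claim_equal_kunlucky := by
  intro T k _ hp
  have hm : 1 ≤ T.length := List.length_pos_of_ne_nil hp.1
  unfold Spec_kunlucky kunlucky kunlucky_alt
  dsimp only
  have hmark : markLucky (((T.length : Int) + 1 - k).toNat + 1) (List.replicate (T.length + 1) false) k 1 (T.length : Int)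
      = buildLuckyGo (((T.length : Int) + 1 - k).toNat + 1) (List.replicate (T.length + 1) false) k 0 (T.length : Int) := by
    simpa using markLucky_eq_buildLuckyGo (((T.length : Int) + 1 - k).toNat + 1)
      (List.replicate (T.length + 1) false) k 0 (T.length : Int)
  have hbuild : buildLucky (List.replicate (T.length + 1) false) k (T.length : Int)
      = buildLuckyGo (((T.length : Int) + 1 - k).toNat + 1) (List.replicate (T.length + 1) false) k 0 (T.length : Int) := rfl
  rw [hmark, hbuild]
  obtain ⟨a, b, c, M, cnt, hA, hB, -⟩ :=
    kunlucky_inv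
      (fun i => PySem.List.pyGetD
        (buildLuckyGo (((T.length : Int) + 1 - k).toNat + 1) (List.replicate (T.length + 1) false) k 0 (T.length : Int))
        (PySem.List.pyGetD T i 0) false)
      (T.length + 1) T.length hm (by push_cast; omega)
  rw [hA, hB]
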